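-- pv_equiv track=rewrite | github.com/lucianfialho/atomic-gates | lib/gate_metadata.py | affected_directories
-- ===== SOURCE A (Python) =====
-- def affected_directories(
--     config: dict, staged: list[str]
-- ) -> list[dict]:
--     """Return the indexed directories that have at least one staged file."""
--     result = []
--     for entry in config.get("indexed_directories") or []:
--         path = entry["path"].rstrip("/")
--         for staged_file in staged:
--             if staged_file == path or staged_file.startswith(path + "/"):
--                 result.append(entry)
--                 break
--     return result
-- ===== SOURCE B (Python) =====
-- def affected_directories(
--     config: dict, staged: list[str]
-- ) -> list[dict]:
--     """Return the indexed directories that have at least one staged file."""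
--     # One pass over staged builds the set of every staged file and every
--     # ancestor directory prefix; each directory is then an O(1) lookup.
--     prefixes = set()
--     for f in staged:
--         prefixes.add(f)
--         for i, ch in enumerate(f):
--             if ch == "/":
--                 prefixes.add(f[:i])
--     return [
--         entry
--         for entry in config.get("indexed_directories") or []
--         if entry["path"].rstrip("/") in prefixes
--     ]
-- ===== Notes on version B (the rewrite author's own statement) =====
-- stated objective: alternative
-- what changed: Instead of rescanning the staged list (comparing each file against the path) for every indexed directory, B makes one pass over staged building the set of staged files plus all their ancestor directory prefixes, and then keeps exactly the directories whose stripped path is a member of that set.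
import Mathlib
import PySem

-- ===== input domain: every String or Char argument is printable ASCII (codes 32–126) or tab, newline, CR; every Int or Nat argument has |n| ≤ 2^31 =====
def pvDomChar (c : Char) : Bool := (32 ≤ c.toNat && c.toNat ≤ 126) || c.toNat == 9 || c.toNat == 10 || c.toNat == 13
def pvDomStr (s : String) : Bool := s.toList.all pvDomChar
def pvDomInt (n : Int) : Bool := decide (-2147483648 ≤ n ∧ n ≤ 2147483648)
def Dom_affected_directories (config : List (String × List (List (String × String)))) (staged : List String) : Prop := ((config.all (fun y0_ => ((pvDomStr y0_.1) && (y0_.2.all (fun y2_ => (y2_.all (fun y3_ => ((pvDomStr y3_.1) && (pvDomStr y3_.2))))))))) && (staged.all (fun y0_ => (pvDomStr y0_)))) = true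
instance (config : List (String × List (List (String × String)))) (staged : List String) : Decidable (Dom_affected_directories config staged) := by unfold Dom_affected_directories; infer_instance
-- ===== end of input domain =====

-- B replaces A's nested directory×staged-file scans by one precomputed set of the staged
-- files and their ancestor directory prefixes; each directory is then a single set lookup.

-- shared helper: s.rstrip("/") ported by hand (PySem has no rstrip-with-argument);
-- exact: drops exactly the trailing '/' characters, as Python's rstrip("/") does
def pvRstripSlash (s : String) : String :=
  String.ofList ((s.toList.reverse.dropWhile (fun c => c == '/')).reverse)

-- ===== PORT A =====
-- inner 'for staged_file in staged: … break' loop of A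
def adHit (path : String) : List String → Bool
  | [] => false
  | f :: rest =>
      if f == path || PySem.Str.startswith f (path ++ "/") then true else adHit path rest

def affected_directories (config : List (String × List (List (String × String)))) (staged : List String) : List (List (String × String)) :=
  ((PySem.Dict.mk config).getD "indexed_directories" []).foldl
    (fun result entry =>
      if adHit (pvRstripSlash ((PySem.Dict.mk entry).getD "path" "")) staged
      then result ++ [entry] else result)
    []

-- ===== PORT B =====
-- B's per-file loop: add f and every prefix f[:i] with f[i] == '/' to the set
def bAddPrefixes (s : PySem.Set String) (f : String) : PySem.Set String :=
  (PySem.List.enumerate f.toList).foldl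
    (fun s p => if p.2 == '/' then PySem.Set.add s (PySem.Str.slice f none (some p.1)) else s)
    (PySem.Set.add s f)

def affected_directories_alt (config : List (String × List (List (String × String)))) (staged : List String) : List (List (String × String)) :=
  let prefixes := staged.foldl bAddPrefixes PySem.Set.empty
  ((PySem.Dict.mk config).getD "indexed_directories" []).filter
    (fun entry => PySem.Set.contains prefixes (pvRstripSlash ((PySem.Dict.mk entry).getD "path" "")))

-- ===== PRECONDITION & SPEC =====
-- Pre_ excludes only inputs where the Python A (and B alike) raises KeyError:
-- an indexed_directories entry without a "path" key.
def Pre_affected_directories (config : List (String × List (List (String × String)))) (_staged : List String) : Prop :=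
  ∀ entry ∈ (PySem.Dict.mk config).getD "indexed_directories" [], ((PySem.Dict.mk entry).get? "path").isSome = true
instance (config : List (String × List (List (String × String)))) (staged : List String) : Decidable (Pre_affected_directories config staged) := by unfold Pre_affected_directories; infer_instance

def pvWitness_affected_directories : (List (String × List (List (String × String)))) × List String :=
  ([("indexed_directories", [[("path", "a")], [("path", "b/")]])], ["a/x.py", "c"])

def Spec_affected_directories (config : List (String × List (List (String × String)))) (staged : List String) (out : List (List (String × String))) : Prop := out = affected_directories_alt config staged
instance (config : List (String × List (List (String × String)))) (staged : List String) (out : List (List (String × String))) : Decidable (Spec_affected_directories config staged out) := by unfold Spec_affected_directories; infer_instance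

-- ===== CLAIM (what is proved, stated in full; the proofs are below) =====
def Claim_equal_affected_directories : Prop := ∀ (config : List (String × List (List (String × String)))) (staged : List String), Dom_affected_directories config staged → Pre_affected_directories config staged → Spec_affected_directories config staged (affected_directories config staged)

-- ===== LEMMAS AND PROOFS =====

-- '(p ++ "/") is a prefix of f' ↔ 'f[:i] = p at some i with f[i] = "/"'
lemma prefix_slash_iff (p f : List Char) :
    (p ++ ['/']) <+: f ↔ ∃ i, i < f.length ∧ f[i]? = some '/' ∧ f.take i = p := by
  constructor
  · rintro ⟨t, ht⟩
    refine ⟨p.length, ?_, ?_, ?_⟩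
    · subst ht; simp
    · subst ht
      rw [List.append_assoc, List.getElem?_append_right (le_refl _)]
      simp
    · subst ht
      rw [List.append_assoc, List.take_left]
  · rintro ⟨i, hi, hget, htake⟩
    refine ⟨f.drop (i + 1), ?_⟩
    obtain ⟨hlt, heq⟩ := List.getElem?_eq_some_iff.mp hget
    have hdrop : f.drop i = '/' :: f.drop (i + 1) := by
      rw [List.drop_eq_getElem_cons hi, heq]
    calc p ++ ['/'] ++ f.drop (i + 1) = f.take i ++ f.drop i := by
          rw [htake.symm, hdrop]; simp
      _ = f := List.take_append_drop i f

-- membership in the set built by B's inner loop over zipIdx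
lemma mem_inner_foldl (f : String) (l : List (Int × Char)) (acc : PySem.Set String) (x : String) :
    x ∈ l.foldl (fun s p => if p.2 == '/' then PySem.Set.add s (PySem.Str.slice f none (some p.1)) else s) acc ↔
      x ∈ acc ∨ ∃ p ∈ l, p.2 = '/' ∧ x = PySem.Str.slice f none (some p.1) := by
  induction l generalizing acc with
  | nil => simp
  | cons q l ih =>
    simp only [List.foldl_cons]
    rw [ih]
    by_cases hq : q.2 = '/'
    · simp only [hq, beq_self_eq_true, if_true, PySem.Set.mem_add, List.mem_cons]
      constructor
      · rintro ((h | h) | ⟨p, hp, hc⟩)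
        · exact Or.inl h
        · exact Or.inr ⟨q, Or.inl rfl, hq, h⟩
        · exact Or.inr ⟨p, Or.inr hp, hc⟩
      · rintro (h | ⟨p, (rfl | hp), hc, hx⟩)
        · exact Or.inl (Or.inl h)
        · exact Or.inl (Or.inr hx)
        · exact Or.inr ⟨p, hp, hc, hx⟩
    · simp only [hq, beq_iff_eq, List.mem_cons]
      constructor
      · rintro (h | ⟨p, hp, hc⟩)
        · exact Or.inl h
        · exact Or.inr ⟨p, Or.inr hp, hc⟩
      · rintro (h | ⟨p, (rfl | hp), hc, hx⟩)
        · exact Or.inl h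
        · exact absurd hc hq
        · exact Or.inr ⟨p, hp, hc, hx⟩

-- membership in B's per-file contribution
lemma mem_bAddPrefixes (s : PySem.Set String) (f x : String) :
    x ∈ bAddPrefixes s f ↔
      x ∈ s ∨ x = f ∨ ∃ p ∈ PySem.List.enumerate f.toList, p.2 = '/' ∧ x = PySem.Str.slice f none (some p.1) := by
  unfold bAddPrefixes
  rw [mem_inner_foldl, PySem.Set.mem_add]
  tauto

-- membership in B's whole prefix set
lemma mem_outer_foldl (staged : List String) (acc : PySem.Set String) (x : String) :
    x ∈ staged.foldl bAddPrefixes acc ↔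
      x ∈ acc ∨ ∃ f ∈ staged, x = f ∨ ∃ p ∈ PySem.List.enumerate f.toList, p.2 = '/' ∧ x = PySem.Str.slice f none (some p.1) := by
  induction staged generalizing acc with
  | nil => simp
  | cons g staged ih =>
    simp only [List.foldl_cons]
    rw [ih, mem_bAddPrefixes]
    constructor
    · rintro ((h | h) | ⟨f, hf, hc⟩)
      · exact Or.inl h
      · exact Or.inr ⟨g, List.mem_cons_self, h⟩
      · exact Or.inr ⟨f, List.mem_cons_of_mem _ hf, hc⟩
    · rintro (h | ⟨f, hf, hc⟩)
      · exact Or.inl (Or.inl h)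
      · rcases List.mem_cons.mp hf with rfl | hf'
        · exact Or.inl (Or.inr hc)
        · exact Or.inr ⟨f, hf', hc⟩

-- A's per-file test agrees with membership of path in B's contribution for that file
lemma per_file_iff (path f : String) :
    (f = path ∨ PySem.Str.startswith f (path ++ "/") = true) ↔
      (path = f ∨ ∃ p ∈ PySem.List.enumerate f.toList, p.2 = '/' ∧ path = PySem.Str.slice f none (some p.1)) := by
  constructor
  · rintro (h | h)
    · exact Or.inl h.symm
    · rw [PySem.Str.startswith_eq, PySem.Chars.startswith_iff, String.toList_append] at h
      obtain ⟨i, hi, hget, htake⟩ := (prefix_slash_iff path.toList f.toList).mp h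
      obtain ⟨hlt, heq⟩ := List.getElem?_eq_some_iff.mp hget
      refine Or.inr ⟨((i : Int), '/'), ?_, rfl, ?_⟩
      · exact (PySem.List.mem_enumerate_iff _ _ _).mpr ⟨i, hlt, by simp [heq]⟩
      · apply String.toList_injective
        rw [PySem.Str.toList_slice, PySem.Chars.slice_eq_listSlice,
          PySem.List.slice_to _ (Int.natCast_nonneg i)]
        simpa using htake.symm
  · rintro (h | ⟨p, hp, hslash, hx⟩)
    · exact Or.inl h.symm
    · right
      rw [PySem.Str.startswith_eq, PySem.Chars.startswith_iff, String.toList_append]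
      apply (prefix_slash_iff path.toList f.toList).mpr
      obtain ⟨k, hk, hpk⟩ := (PySem.List.mem_enumerate_iff _ _ _).mp hp
      refine ⟨k, hk, ?_, ?_⟩
      · rw [List.getElem?_eq_getElem hk, ← show p.2 = f.toList[k] by rw [hpk], hslash]
      · rw [hx, hpk, PySem.Str.toList_slice, PySem.Chars.slice_eq_listSlice,
          PySem.List.slice_to _ (by simp)]
        simp

-- A's inner loop is List.any of its test
lemma adHit_eq_any (path : String) (staged : List String) :
    adHit path staged = staged.any (fun f => f == path || PySem.Str.startswith f (path ++ "/")) := by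
  induction staged with
  | nil => rfl
  | cons f rest ih =>
    show (if (f == path || PySem.Str.startswith f (path ++ "/")) = true then true else adHit path rest) = _
    rw [List.any_cons, ← ih]
    cases h : (f == path || PySem.Str.startswith f (path ++ "/"))
    · rw [Bool.false_or, if_neg (by decide)]
    · rw [Bool.true_or, if_pos rfl]

-- the pointwise bridge: A's scan equals B's set lookup, for every path
lemma hit_eq_contains (path : String) (staged : List String) :
    adHit path staged = PySem.Set.contains (staged.foldl bAddPrefixes PySem.Set.empty) path := by
  rw [Bool.eq_iff_iff, adHit_eq_any, List.any_eq_true, PySem.Set.contains_iff, mem_outer_foldl]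
  simp only [PySem.Set.empty, List.not_mem_nil, false_or, Bool.or_eq_true, beq_iff_eq]
  constructor
  · rintro ⟨f, hf, hc⟩
    exact ⟨f, hf, (per_file_iff path f).mp hc⟩
  · rintro ⟨f, hf, hc⟩
    exact ⟨f, hf, (per_file_iff path f).mpr hc⟩

-- ===== VERDICT (by name: the statement is the Claim_ definition above) =====
theorem affected_directories_spec : Claim_equal_affected_directories := by
  intro config staged _ _
  show affected_directories config staged = affected_directories_alt config staged
  unfold affected_directories affected_directories_alt
  have h := PySem.List.foldl_append_if
    (fun entry => adHit (pvRstripSlash ((PySem.Dict.mk entry).getD "path" "")) staged)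
    (id) ((PySem.Dict.mk config).getD "indexed_directories" []) []
  simp only [id_eq, List.nil_append] at h
  rw [h]
  simp only [hit_eq_contains, List.map_id]
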